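-- pv_equiv track=rewrite | github.com/loader01hash/weather-agent | agents/openrouter_smart_agent.py | _simple_intent_detection
-- ===== SOURCE A (Python) =====
-- def _simple_intent_detection(query: str) -> str:
--     """Simple fallback intent detection."""
--     query_lower = query.lower()
--
--     # Multi-city comparison queries
--     if any(word in query_lower for word in ["compare", "comparison", "vs", "versus", "difference", "between"]):
--         return "comparison"
--     # Travel and planning queries
--     elif any(word in query_lower for word in ["travel", "trip", "vacation", "holiday", "visit", "going to"]):
--         return "travel_planning"
--     elif any(word in query_lower for word in ["pack", "packing", "luggage", "suitcase", "bring"]):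
--         return "packing_advice"
--     elif any(word in query_lower for word in ["weekend", "tomorrow", "next week", "this week", "plan"]):
--         return "planning"
--     # Event and occasion queries
--     elif any(word in query_lower for word in ["wedding", "party", "event", "celebration", "ceremony"]):
--         return "event_planning"
--     elif any(word in query_lower for word in ["work", "office", "meeting", "business", "professional"]):
--         return "work_attire"
--     elif any(word in query_lower for word in ["date", "dinner", "restaurant", "going out"]):
--         return "social_occasion"
--     # Specific weather condition queries
--     elif any(word in query_lower for word in ["raining", "rain", "rainy", "drizzle", "shower"]):
--         return "rain_check"
--     elif any(word in query_lower for word in ["sunny", "sun", "clear", "bright"]):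
--         return "sun_check"
--     elif any(word in query_lower for word in ["cloudy", "clouds", "overcast"]):
--         return "cloud_check"
--     elif any(word in query_lower for word in ["windy", "wind", "breezy"]):
--         return "wind_check"
--     elif any(word in query_lower for word in ["snowing", "snow", "snowy"]):
--         return "snow_check"
--     elif any(word in query_lower for word in ["hot", "heat", "warm", "temperature"]):
--         return "temperature_check"
--     elif any(word in query_lower for word in ["cold", "cool", "chilly", "freezing"]):
--         return "cold_check"
--     elif any(word in query_lower for word in ["humid", "humidity", "muggy", "sticky"]):
--         return "humidity_check"
--     # Activity-specific queries
--     elif any(word in query_lower for word in ["cricket", "play cricket", "cricket match"]):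
--         return "cricket"
--     elif any(word in query_lower for word in ["football", "soccer", "play football"]):
--         return "football"
--     elif any(word in query_lower for word in ["tennis", "play tennis"]):
--         return "tennis"
--     elif any(word in query_lower for word in ["running", "jogging", "run", "jog"]):
--         return "running"
--     elif any(word in query_lower for word in ["cycling", "bike", "biking"]):
--         return "cycling"
--     elif any(word in query_lower for word in ["swimming", "swim"]):
--         return "swimming"
--     elif any(word in query_lower for word in ["hiking", "trekking", "trek"]):
--         return "hiking"
--     # General intents
--     elif any(word in query_lower for word in ["wear", "clothing", "dress", "jacket", "coat"]):
--         return "clothing"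
--     elif any(word in query_lower for word in ["activity", "exercise", "sports", "outdoor", "play"]):
--         return "activities"
--     elif any(word in query_lower for word in ["health", "safe", "safety", "dangerous", "concern"]):
--         return "health"
--     elif any(word in query_lower for word in ["important", "priority", "main", "key", "most"]):
--         return "priority"
--     else:
--         return "general"
-- ===== SOURCE B (Python) =====
-- # B: query-driven scan. Instead of testing every keyword against the query,
-- # walk the query once and look up each short substring (window of length 1..13)
-- # in a precomputed keyword -> priority-rank hash map, keeping the minimum rank.
-- # The minimum rank equals the first elif branch of A that would fire.
--
-- _CATEGORIES = [
--     "comparison", "travel_planning", "packing_advice", "planning",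
--     "event_planning", "work_attire", "social_occasion", "rain_check",
--     "sun_check", "cloud_check", "wind_check", "snow_check",
--     "temperature_check", "cold_check", "humidity_check", "cricket",
--     "football", "tennis", "running", "cycling", "swimming", "hiking",
--     "clothing", "activities", "health", "priority",
-- ]
--
-- _KEYWORDS = [
--     ["compare", "comparison", "vs", "versus", "difference", "between"],
--     ["travel", "trip", "vacation", "holiday", "visit", "going to"],
--     ["pack", "packing", "luggage", "suitcase", "bring"],
--     ["weekend", "tomorrow", "next week", "this week", "plan"],
--     ["wedding", "party", "event", "celebration", "ceremony"],
--     ["work", "office", "meeting", "business", "professional"],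
--     ["date", "dinner", "restaurant", "going out"],
--     ["raining", "rain", "rainy", "drizzle", "shower"],
--     ["sunny", "sun", "clear", "bright"],
--     ["cloudy", "clouds", "overcast"],
--     ["windy", "wind", "breezy"],
--     ["snowing", "snow", "snowy"],
--     ["hot", "heat", "warm", "temperature"],
--     ["cold", "cool", "chilly", "freezing"],
--     ["humid", "humidity", "muggy", "sticky"],
--     ["cricket", "play cricket", "cricket match"],
--     ["football", "soccer", "play football"],
--     ["tennis", "play tennis"],
--     ["running", "jogging", "run", "jog"],
--     ["cycling", "bike", "biking"],
--     ["swimming", "swim"],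
--     ["hiking", "trekking", "trek"],
--     ["wear", "clothing", "dress", "jacket", "coat"],
--     ["activity", "exercise", "sports", "outdoor", "play"],
--     ["health", "safe", "safety", "dangerous", "concern"],
--     ["important", "priority", "main", "key", "most"],
-- ]
--
-- _RANK = {}
-- for _r, _words in enumerate(_KEYWORDS):
--     for _w in _words:
--         _RANK.setdefault(_w, _r)
-- _MAXLEN = max(len(_w) for _w in _RANK)
--
--
-- def _simple_intent_detection(query: str) -> str:
--     q = query.lower()
--     best = len(_CATEGORIES)
--     for i in range(len(q)):
--         for length in range(1, _MAXLEN + 1):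
--             r = _RANK.get(q[i:i + length])
--             if r is not None and r < best:
--                 best = r
--     return (_CATEGORIES + ["general"])[best]
-- ===== Notes on version B (the rewrite author's own statement) =====
-- stated objective: alternative
-- what changed: Replaces A's keyword-driven elif chain (each branch substring-searching the whole query) by a query-driven single scan: every window of length 1..13 of the lowered query is looked up in a precomputed keyword->priority-rank hash map and the minimum rank, i.e. the first branch of A that would fire, selects the category.
import Mathlib
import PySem

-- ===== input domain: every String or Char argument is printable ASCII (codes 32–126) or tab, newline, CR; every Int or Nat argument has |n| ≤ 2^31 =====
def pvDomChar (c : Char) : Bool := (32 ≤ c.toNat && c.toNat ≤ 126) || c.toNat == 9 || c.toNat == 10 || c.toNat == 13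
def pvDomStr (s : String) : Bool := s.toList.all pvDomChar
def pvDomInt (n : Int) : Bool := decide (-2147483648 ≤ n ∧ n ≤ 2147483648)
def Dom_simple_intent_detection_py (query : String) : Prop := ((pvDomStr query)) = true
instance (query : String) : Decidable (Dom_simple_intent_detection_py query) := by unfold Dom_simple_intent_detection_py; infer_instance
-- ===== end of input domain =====

-- B replaces A's keyword-driven elif chain by a query-driven scan: each window of length 1..13
-- of the lowered query is looked up in a keyword -> priority-rank map and the minimum rank wins;
-- objective: alternative.

-- ===== PORT A =====
-- Literal transliteration of A's if/elif chain; 'word in query_lower' is PySem.Str.isIn.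
def simple_intent_detection_py (query : String) : String :=
  let ql := PySem.Str.lower query
  if ["compare", "comparison", "vs", "versus", "difference", "between"].any (fun w => PySem.Str.isIn w ql) then "comparison"
  else if ["travel", "trip", "vacation", "holiday", "visit", "going to"].any (fun w => PySem.Str.isIn w ql) then "travel_planning"
  else if ["pack", "packing", "luggage", "suitcase", "bring"].any (fun w => PySem.Str.isIn w ql) then "packing_advice"
  else if ["weekend", "tomorrow", "next week", "this week", "plan"].any (fun w => PySem.Str.isIn w ql) then "planning"
  else if ["wedding", "party", "event", "celebration", "ceremony"].any (fun w => PySem.Str.isIn w ql) then "event_planning"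
  else if ["work", "office", "meeting", "business", "professional"].any (fun w => PySem.Str.isIn w ql) then "work_attire"
  else if ["date", "dinner", "restaurant", "going out"].any (fun w => PySem.Str.isIn w ql) then "social_occasion"
  else if ["raining", "rain", "rainy", "drizzle", "shower"].any (fun w => PySem.Str.isIn w ql) then "rain_check"
  else if ["sunny", "sun", "clear", "bright"].any (fun w => PySem.Str.isIn w ql) then "sun_check"
  else if ["cloudy", "clouds", "overcast"].any (fun w => PySem.Str.isIn w ql) then "cloud_check"
  else if ["windy", "wind", "breezy"].any (fun w => PySem.Str.isIn w ql) then "wind_check"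
  else if ["snowing", "snow", "snowy"].any (fun w => PySem.Str.isIn w ql) then "snow_check"
  else if ["hot", "heat", "warm", "temperature"].any (fun w => PySem.Str.isIn w ql) then "temperature_check"
  else if ["cold", "cool", "chilly", "freezing"].any (fun w => PySem.Str.isIn w ql) then "cold_check"
  else if ["humid", "humidity", "muggy", "sticky"].any (fun w => PySem.Str.isIn w ql) then "humidity_check"
  else if ["cricket", "play cricket", "cricket match"].any (fun w => PySem.Str.isIn w ql) then "cricket"
  else if ["football", "soccer", "play football"].any (fun w => PySem.Str.isIn w ql) then "football"
  else if ["tennis", "play tennis"].any (fun w => PySem.Str.isIn w ql) then "tennis"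
  else if ["running", "jogging", "run", "jog"].any (fun w => PySem.Str.isIn w ql) then "running"
  else if ["cycling", "bike", "biking"].any (fun w => PySem.Str.isIn w ql) then "cycling"
  else if ["swimming", "swim"].any (fun w => PySem.Str.isIn w ql) then "swimming"
  else if ["hiking", "trekking", "trek"].any (fun w => PySem.Str.isIn w ql) then "hiking"
  else if ["wear", "clothing", "dress", "jacket", "coat"].any (fun w => PySem.Str.isIn w ql) then "clothing"
  else if ["activity", "exercise", "sports", "outdoor", "play"].any (fun w => PySem.Str.isIn w ql) then "activities"
  else if ["health", "safe", "safety", "dangerous", "concern"].any (fun w => PySem.Str.isIn w ql) then "health"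
  else if ["important", "priority", "main", "key", "most"].any (fun w => PySem.Str.isIn w ql) then "priority"
  else "general"

-- ===== PORT B =====
-- Source B's module-level data: _CATEGORIES, _KEYWORDS, the setdefault build loop for _RANK, _MAXLEN.
def pvCategories : List String :=
  [ "comparison", "travel_planning", "packing_advice", "planning",
    "event_planning", "work_attire", "social_occasion", "rain_check",
    "sun_check", "cloud_check", "wind_check", "snow_check",
    "temperature_check", "cold_check", "humidity_check", "cricket",
    "football", "tennis", "running", "cycling", "swimming", "hiking",
    "clothing", "activities", "health", "priority" ]

def pvKeywordLists : List (List String) :=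
  [ ["compare", "comparison", "vs", "versus", "difference", "between"],
    ["travel", "trip", "vacation", "holiday", "visit", "going to"],
    ["pack", "packing", "luggage", "suitcase", "bring"],
    ["weekend", "tomorrow", "next week", "this week", "plan"],
    ["wedding", "party", "event", "celebration", "ceremony"],
    ["work", "office", "meeting", "business", "professional"],
    ["date", "dinner", "restaurant", "going out"],
    ["raining", "rain", "rainy", "drizzle", "shower"],
    ["sunny", "sun", "clear", "bright"],
    ["cloudy", "clouds", "overcast"],
    ["windy", "wind", "breezy"],
    ["snowing", "snow", "snowy"],
    ["hot", "heat", "warm", "temperature"],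
    ["cold", "cool", "chilly", "freezing"],
    ["humid", "humidity", "muggy", "sticky"],
    ["cricket", "play cricket", "cricket match"],
    ["football", "soccer", "play football"],
    ["tennis", "play tennis"],
    ["running", "jogging", "run", "jog"],
    ["cycling", "bike", "biking"],
    ["swimming", "swim"],
    ["hiking", "trekking", "trek"],
    ["wear", "clothing", "dress", "jacket", "coat"],
    ["activity", "exercise", "sports", "outdoor", "play"],
    ["health", "safe", "safety", "dangerous", "concern"],
    ["important", "priority", "main", "key", "most"] ]

-- for _r, _words in enumerate(_KEYWORDS): for _w in _words: _RANK.setdefault(_w, _r)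
def pvRank : PySem.Dict String Int :=
  (PySem.List.enumerate pvKeywordLists).foldl
    (fun d p => p.2.foldl (fun d w => d.setdefault w p.1) d) PySem.Dict.empty

-- _MAXLEN = max(len(_w) for _w in _RANK)  (the dict is a nonempty literal, so max never raises)
def pvMaxLen : Int :=
  ((pvRank.keys.map (fun w => PySem.Str.len w)).max?).getD 0

-- B: scan the lowered query; look every window q[i:i+length], 1 ≤ length ≤ _MAXLEN, up in the
-- rank map; keep the minimum rank; index the category table (best ≤ 26 always, so the
-- getD default is never used — it ports the in-range Python indexing (_CATEGORIES+["general"])[best]).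
def simple_intent_detection_py_alt (query : String) : String :=
  let q := PySem.Str.lower query
  let best :=
    (PySem.List.pyRange 0 (PySem.Str.len q) 1).foldl
      (fun best i =>
        (PySem.List.pyRange 1 (pvMaxLen + 1) 1).foldl
          (fun best len =>
            match pvRank.get? (PySem.Str.slice q (some i) (some (i + len))) with
            | some r => if r < best then r else best
            | none => best)
          best)
      (pvCategories.length : Int)
  PySem.List.pyGetD (pvCategories ++ ["general"]) best "general"

-- ===== PRECONDITION & SPEC =====
def Spec_simple_intent_detection_py (query : String) (out : String) : Prop := out = simple_intent_detection_py_alt query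
instance (query : String) (out : String) : Decidable (Spec_simple_intent_detection_py query out) := by unfold Spec_simple_intent_detection_py; infer_instance

-- ===== CLAIM (what is proved, stated in full; the proofs are below) =====
def Claim_equal_simple_intent_detection_py : Prop := ∀ (query : String), Dom_simple_intent_detection_py query → Spec_simple_intent_detection_py query (simple_intent_detection_py query)

-- ===== LEMMAS AND PROOFS =====

-- the matcher of group ws against the lowered query, and A's branch index
def pvMatch (q : String) (ws : List String) : Bool := ws.any (fun w => PySem.Str.isIn w q)

def pvChainIdx (q : String) : Nat := pvKeywordLists.findIdx (pvMatch q)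

-- lookup of one window
def pvLook (q : String) (p : Int × Int) : Option Int :=
  pvRank.get? (PySem.Str.slice q (some p.1) (some (p.1 + p.2)))

def pvPairs (q : String) : List (Int × Int) :=
  (PySem.List.pyRange 0 (PySem.Str.len q) 1).flatMap
    (fun i => (PySem.List.pyRange 1 14 1).map (fun len => (i, len)))

def pvFold (q : String) (l : List (Int × Int)) (b : Int) : Int :=
  l.foldl (fun best p =>
    match pvLook q p with
    | some r => if r < best then r else best
    | none => best) b

set_option maxRecDepth 40000 in
theorem pvMaxLen_eq : pvMaxLen = 13 := by decide

set_option maxRecDepth 40000 in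
theorem pvRank_nodup : pvRank.keys.Nodup := by decide

-- concrete facts about every item of the rank map
set_option maxRecDepth 40000 in
theorem pvRank_items_fact : ∀ p ∈ pvRank.items,
    0 ≤ p.2 ∧ p.2 < 26 ∧ 1 ≤ p.1.toList.length ∧ p.1.toList.length ≤ 13 ∧
      p.1 ∈ pvKeywordLists.getD p.2.toNat [] := by
  have h : pvRank.items.all (fun p =>
      decide (0 ≤ p.2) && decide (p.2 < 26) && decide (1 ≤ p.1.toList.length) &&
      decide (p.1.toList.length ≤ 13) && decide (p.1 ∈ pvKeywordLists.getD p.2.toNat [])) = true := by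
    decide
  intro p hp
  have := List.all_eq_true.mp h p hp
  simp only [Bool.and_eq_true, decide_eq_true_eq] at this
  exact ⟨this.1.1.1.1, this.1.1.1.2, this.1.1.2, this.1.2, this.2⟩

-- every (keyword, rank) of the table is an item of the rank map (no duplicate keywords)
set_option maxRecDepth 40000 in
theorem pvRank_items_complete : ∀ r < 26, ∀ w ∈ pvKeywordLists.getD r [],
    ((w, (r : Int)) ∈ pvRank.items) := by
  have h : (List.range 26).all (fun r =>
      (pvKeywordLists.getD r []).all (fun w => decide ((w, (r : Int)) ∈ pvRank.items))) = true := by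
    decide
  intro r hr w hw
  have := List.all_eq_true.mp h r (List.mem_range.mpr hr)
  exact decide_eq_true_eq.mp (List.all_eq_true.mp this w hw)

theorem pvFold_cons (q : String) (x : Int × Int) (xs : List (Int × Int)) (b : Int) :
    pvFold q (x :: xs) b
      = pvFold q xs (match pvLook q x with
          | some r => if r < b then r else b
          | none => b) := by
  simp only [pvFold, List.foldl_cons]

-- fold lemmas
theorem pvFold_le_init (q : String) (l : List (Int × Int)) (b : Int) : pvFold q l b ≤ b := by
  induction l generalizing b with
  | nil => simp [pvFold]
  | cons x xs ih =>
    rw [pvFold_cons]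
    rcases hx : pvLook q x with _ | r
    · exact ih b
    · by_cases hr : r < b
      · simp only [hr, if_pos]
        exact le_trans (ih r) (le_of_lt hr)
      · simp only [hr, if_neg, not_false_iff]
        exact ih b

theorem pvFold_le (q : String) (l : List (Int × Int)) (b : Int) (x : Int × Int) (r : Int)
    (hx : x ∈ l) (hl : pvLook q x = some r) : pvFold q l b ≤ r := by
  induction l generalizing b with
  | nil => simp at hx
  | cons y ys ih =>
    rw [pvFold_cons]
    rcases List.mem_cons.mp hx with rfl | hmem
    · rw [hl]
      by_cases hr : r < b
      · simp only [hr, if_pos]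
        exact pvFold_le_init q ys r
      · simp only [hr, if_neg, not_false_iff]
        exact le_trans (pvFold_le_init q ys b) (le_of_not_gt hr)
    · exact ih _ hmem

theorem pvFold_cases (q : String) (l : List (Int × Int)) (b : Int) :
    pvFold q l b = b ∨ ∃ x ∈ l, pvLook q x = some (pvFold q l b) := by
  induction l generalizing b with
  | nil => simp [pvFold]
  | cons x xs ih =>
    rw [pvFold_cons]
    rcases hx : pvLook q x with _ | r
    · rcases ih b with h | ⟨y, hy, hl⟩
      · exact Or.inl h
      · exact Or.inr ⟨y, List.mem_cons_of_mem _ hy, hl⟩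
    · by_cases hr : r < b
      · simp only [hr, if_pos]
        rcases ih r with h | ⟨y, hy, hl⟩
        · exact Or.inr ⟨x, List.mem_cons_self .., by rw [hx, h]⟩
        · exact Or.inr ⟨y, List.mem_cons_of_mem _ hy, hl⟩
      · simp only [hr, if_neg, not_false_iff]
        rcases ih b with h | ⟨y, hy, hl⟩
        · exact Or.inl h
        · exact Or.inr ⟨y, List.mem_cons_of_mem _ hy, hl⟩

-- nested foldl over ranges = pvFold over the flattened pair list
theorem pvNested_eq_fold (q : String) (b : Int) :
    (PySem.List.pyRange 0 (PySem.Str.len q) 1).foldl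
      (fun best i =>
        (PySem.List.pyRange 1 (pvMaxLen + 1) 1).foldl
          (fun best len =>
            match pvRank.get? (PySem.Str.slice q (some i) (some (i + len))) with
            | some r => if r < best then r else best
            | none => best)
          best) b
    = pvFold q (pvPairs q) b := by
  have hin : ∀ (i b : Int),
      (PySem.List.pyRange 1 (pvMaxLen + 1) 1).foldl
        (fun best len =>
          match pvRank.get? (PySem.Str.slice q (some i) (some (i + len))) with
          | some r => if r < best then r else best
          | none => best) b
      = ((PySem.List.pyRange 1 14 1).map (fun len => (i, len))).foldl
          (fun best p =>
            match pvLook q p with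
            | some r => if r < best then r else best
            | none => best) b := by
    intro i b
    rw [List.foldl_map, pvMaxLen_eq]
    norm_num [pvLook]
  simp only [hin]
  rw [← List.foldl_flatMap]
  simp only [pvFold, pvPairs]

-- a matching keyword yields a window pair hitting its rank
theorem pvExists_pair (q : String) (w : String) (r : Int)
    (hg : pvRank.get? w = some r) (hin : PySem.Str.isIn w q = true) :
    ∃ p ∈ pvPairs q, pvLook q p = some r := by
  have hitem := PySem.Dict.mem_items_of_get?_eq_some pvRank hg
  obtain ⟨-, -, hlen1', hlen13', -⟩ := pvRank_items_fact _ hitem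
  have hlen1 : 1 ≤ w.toList.length := hlen1'
  have hlen13 : w.toList.length ≤ 13 := hlen13'
  have hinf : PySem.Chars.isIn w.toList q.toList = true := by
    rw [← PySem.Str.isIn_eq]; exact hin
  obtain ⟨j, hpre⟩ := (PySem.Chars.exists_prefix_drop_iff_isIn _ _).mpr hinf
  have hj : j < q.toList.length := by
    by_contra hge
    rw [List.drop_eq_nil_of_le (le_of_not_gt hge)] at hpre
    rw [List.prefix_nil.mp hpre] at hlen1
    simp at hlen1
  refine ⟨((j : Int), (w.toList.length : Int)), ?_, ?_⟩
  · unfold pvPairs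
    rw [List.mem_flatMap]
    refine ⟨(j : Int), ?_, ?_⟩
    · rw [PySem.List.mem_pyRange_one]
      have : PySem.Str.len q = (q.toList.length : Int) := by simp [pysem]
      omega
    · rw [List.mem_map]
      exact ⟨(w.toList.length : Int), by rw [PySem.List.mem_pyRange_one]; omega, rfl⟩
  · unfold pvLook
    have hs : (PySem.Str.slice q (some (j : Int)) (some ((j : Int) + (w.toList.length : Int)))).toList
        = w.toList := by
      have hb : (PySem.Str.slice q (some (j : Int)) (some ((j : Int) + (w.toList.length : Int)))).toList
          = PySem.List.slice q.toList (some (j : Int)) (some ((j : Int) + (w.toList.length : Int))) := by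
        simp [pysem]
      rw [hb, PySem.List.slice_natCast_add]
      exact (List.prefix_iff_eq_take.mp hpre).symm
  -- the window IS the keyword, so its lookup is the keyword's rank
    simpa using hg ▸ congrArg pvRank.get? (String.toList_inj.mp hs)

-- a hit window is a keyword occurring in q
theorem pvPair_keyword (q : String) (p : Int × Int) (r : Int)
    (hp : p ∈ pvPairs q) (hl : pvLook q p = some r) :
    ∃ w, pvRank.get? w = some r ∧ PySem.Str.isIn w q = true := by
  refine ⟨PySem.Str.slice q (some p.1) (some (p.1 + p.2)), hl, ?_⟩
  have hb : 0 ≤ p.1 ∧ 1 ≤ p.2 := by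
    unfold pvPairs at hp
    rw [List.mem_flatMap] at hp
    obtain ⟨i, hi, hmem⟩ := hp
    rw [List.mem_map] at hmem
    obtain ⟨len, hlen, rfl⟩ := hmem
    rw [PySem.List.mem_pyRange_one] at hi hlen
    exact ⟨hi.1, hlen.1⟩
  rw [PySem.Str.isIn_iff_infix]
  have hs : (PySem.Str.slice q (some p.1) (some (p.1 + p.2))).toList
      = (q.toList.drop p.1.toNat).take ((p.1 + p.2).toNat - p.1.toNat) := by
    have hb2 : (PySem.Str.slice q (some p.1) (some (p.1 + p.2))).toList
        = PySem.List.slice q.toList (some p.1) (some (p.1 + p.2)) := by simp [pysem]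
    rw [hb2, PySem.List.slice_toNat q.toList hb.1 (by omega)]
  rw [hs]
  exact ((List.take_prefix _ _).isInfix).trans ((List.drop_suffix _ _).isInfix)

theorem pvKeywordLists_length : pvKeywordLists.length = 26 := rfl

theorem pvCategories_length : pvCategories.length = 26 := rfl

theorem pvChainIdx_le (q : String) : pvChainIdx q ≤ 26 := by
  have := List.findIdx_le_length (p := pvMatch q) (xs := pvKeywordLists)
  rwa [pvKeywordLists_length] at this

theorem pvChain_le_of_match (q : String) (r : Nat) (hr : r < 26)
    (hm : pvMatch q (pvKeywordLists.getD r []) = true) : pvChainIdx q ≤ r := by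
  by_contra h
  rw [Nat.not_le] at h
  have hlen : r < pvKeywordLists.length := by rw [pvKeywordLists_length]; exact hr
  have hfalse := List.not_of_lt_findIdx (p := pvMatch q) h
  rw [List.getD_eq_getElem pvKeywordLists [] hlen] at hm
  exact absurd hm (by simpa using hfalse)

theorem pvDict_get?_iff (w : String) (r : Int) :
    pvRank.get? w = some r ↔ (w, r) ∈ pvRank.items :=
  PySem.Dict.get?_eq_some_iff_mem_items (d := pvRank) (k := w) (v := r) pvRank_nodup

-- the minimum rank equals A's first-firing branch index
theorem pvBest_eq_chain (q : String) :
    pvFold q (pvPairs q) (pvCategories.length : Int) = (pvChainIdx q : Int) := by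
  have hcat : (pvCategories.length : Int) = 26 := by rw [pvCategories_length]; norm_num
  have hchain26 := pvChainIdx_le q
  -- upper bound: the fold descends at least to the first-firing branch
  have hup : pvFold q (pvPairs q) (pvCategories.length : Int) ≤ (pvChainIdx q : Int) := by
    by_cases hlt : pvChainIdx q < 26
    · have hfi : pvChainIdx q < pvKeywordLists.length := by
        rw [pvKeywordLists_length]; exact hlt
      have hp : pvMatch q pvKeywordLists[pvChainIdx q] = true :=
        List.findIdx_getElem (w := hfi)
      obtain ⟨w, hw, hin⟩ := List.any_eq_true.mp hp
      have hw' : w ∈ pvKeywordLists.getD (pvChainIdx q) [] := by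
        rwa [List.getD_eq_getElem pvKeywordLists [] hfi]
      have hmem : (w, ((pvChainIdx q : Nat) : Int)) ∈ pvRank.items := by
        have := pvRank_items_complete (pvChainIdx q) hlt w hw'
        simpa using this
      have hget : pvRank.get? w = some ((pvChainIdx q : Nat) : Int) :=
        (pvDict_get?_iff w _).mpr hmem
      obtain ⟨p, hp1, hp2⟩ := pvExists_pair q w _ hget hin
      exact pvFold_le q _ _ p _ hp1 hp2
    · have h26 : pvChainIdx q = 26 := le_antisymm hchain26 (not_lt.mp hlt)
      rw [h26]
      have := pvFold_le_init q (pvPairs q) (pvCategories.length : Int)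
      rw [hcat] at this
      exact_mod_cast this
  -- lower bound: the fold's value is a matching branch, so the chain fires at or before it
  rcases pvFold_cases q (pvPairs q) (pvCategories.length : Int) with hb | ⟨p, hp, hl⟩
  · rw [hb] at hup ⊢
    omega
  · obtain ⟨w, hget, hin⟩ := pvPair_keyword q p _ hp hl
    have hfac := pvRank_items_fact _ (PySem.Dict.mem_items_of_get?_eq_some pvRank hget)
    set B := pvFold q (pvPairs q) (pvCategories.length : Int) with hBdef
    have h0B : 0 ≤ B := hfac.1
    have hB26 : B < 26 := hfac.2.1
    have hwmem : w ∈ pvKeywordLists.getD B.toNat [] := hfac.2.2.2.2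
    have hmatch : pvMatch q (pvKeywordLists.getD B.toNat []) = true :=
      List.any_eq_true.mpr ⟨w, hwmem, hin⟩
    have hle := pvChain_le_of_match q B.toNat (by omega) hmatch
    omega

set_option maxHeartbeats 2000000 in
theorem pvA_eq_chain (query : String) :
    simple_intent_detection_py query
      = (pvCategories ++ ["general"]).getD (pvChainIdx (PySem.Str.lower query)) "general" := by
  simp only [simple_intent_detection_py, pvChainIdx, pvMatch, pvKeywordLists, List.findIdx_cons]
  cases (["compare", "comparison", "vs", "versus", "difference", "between"].any fun w => PySem.Str.isIn w (PySem.Str.lower query)) with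
  | true => simp only [cond_true, reduceIte]; rfl
  | false =>
  simp only [cond_false, Bool.false_eq_true, reduceIte]
  cases (["travel", "trip", "vacation", "holiday", "visit", "going to"].any fun w => PySem.Str.isIn w (PySem.Str.lower query)) with
  | true => simp only [cond_true, reduceIte]; rfl
  | false =>
  simp only [cond_false, Bool.false_eq_true, reduceIte]
  cases (["pack", "packing", "luggage", "suitcase", "bring"].any fun w => PySem.Str.isIn w (PySem.Str.lower query)) with
  | true => simp only [cond_true, reduceIte]; rfl
  | false =>
  simp only [cond_false, Bool.false_eq_true, reduceIte]
  cases (["weekend", "tomorrow", "next week", "this week", "plan"].any fun w => PySem.Str.isIn w (PySem.Str.lower query)) with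
  | true => simp only [cond_true, reduceIte]; rfl
  | false =>
  simp only [cond_false, Bool.false_eq_true, reduceIte]
  cases (["wedding", "party", "event", "celebration", "ceremony"].any fun w => PySem.Str.isIn w (PySem.Str.lower query)) with
  | true => simp only [cond_true, reduceIte]; rfl
  | false =>
  simp only [cond_false, Bool.false_eq_true, reduceIte]
  cases (["work", "office", "meeting", "business", "professional"].any fun w => PySem.Str.isIn w (PySem.Str.lower query)) with
  | true => simp only [cond_true, reduceIte]; rfl
  | false =>
  simp only [cond_false, Bool.false_eq_true, reduceIte]
  cases (["date", "dinner", "restaurant", "going out"].any fun w => PySem.Str.isIn w (PySem.Str.lower query)) with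
  | true => simp only [cond_true, reduceIte]; rfl
  | false =>
  simp only [cond_false, Bool.false_eq_true, reduceIte]
  cases (["raining", "rain", "rainy", "drizzle", "shower"].any fun w => PySem.Str.isIn w (PySem.Str.lower query)) with
  | true => simp only [cond_true, reduceIte]; rfl
  | false =>
  simp only [cond_false, Bool.false_eq_true, reduceIte]
  cases (["sunny", "sun", "clear", "bright"].any fun w => PySem.Str.isIn w (PySem.Str.lower query)) with
  | true => simp only [cond_true, reduceIte]; rfl
  | false =>
  simp only [cond_false, Bool.false_eq_true, reduceIte]
  cases (["cloudy", "clouds", "overcast"].any fun w => PySem.Str.isIn w (PySem.Str.lower query)) with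
  | true => simp only [cond_true, reduceIte]; rfl
  | false =>
  simp only [cond_false, Bool.false_eq_true, reduceIte]
  cases (["windy", "wind", "breezy"].any fun w => PySem.Str.isIn w (PySem.Str.lower query)) with
  | true => simp only [cond_true, reduceIte]; rfl
  | false =>
  simp only [cond_false, Bool.false_eq_true, reduceIte]
  cases (["snowing", "snow", "snowy"].any fun w => PySem.Str.isIn w (PySem.Str.lower query)) with
  | true => simp only [cond_true, reduceIte]; rfl
  | false =>
  simp only [cond_false, Bool.false_eq_true, reduceIte]
  cases (["hot", "heat", "warm", "temperature"].any fun w => PySem.Str.isIn w (PySem.Str.lower query)) with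
  | true => simp only [cond_true, reduceIte]; rfl
  | false =>
  simp only [cond_false, Bool.false_eq_true, reduceIte]
  cases (["cold", "cool", "chilly", "freezing"].any fun w => PySem.Str.isIn w (PySem.Str.lower query)) with
  | true => simp only [cond_true, reduceIte]; rfl
  | false =>
  simp only [cond_false, Bool.false_eq_true, reduceIte]
  cases (["humid", "humidity", "muggy", "sticky"].any fun w => PySem.Str.isIn w (PySem.Str.lower query)) with
  | true => simp only [cond_true, reduceIte]; rfl
  | false =>
  simp only [cond_false, Bool.false_eq_true, reduceIte]
  cases (["cricket", "play cricket", "cricket match"].any fun w => PySem.Str.isIn w (PySem.Str.lower query)) with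
  | true => simp only [cond_true, reduceIte]; rfl
  | false =>
  simp only [cond_false, Bool.false_eq_true, reduceIte]
  cases (["football", "soccer", "play football"].any fun w => PySem.Str.isIn w (PySem.Str.lower query)) with
  | true => simp only [cond_true, reduceIte]; rfl
  | false =>
  simp only [cond_false, Bool.false_eq_true, reduceIte]
  cases (["tennis", "play tennis"].any fun w => PySem.Str.isIn w (PySem.Str.lower query)) with
  | true => simp only [cond_true, reduceIte]; rfl
  | false =>
  simp only [cond_false, Bool.false_eq_true, reduceIte]
  cases (["running", "jogging", "run", "jog"].any fun w => PySem.Str.isIn w (PySem.Str.lower query)) with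
  | true => simp only [cond_true, reduceIte]; rfl
  | false =>
  simp only [cond_false, Bool.false_eq_true, reduceIte]
  cases (["cycling", "bike", "biking"].any fun w => PySem.Str.isIn w (PySem.Str.lower query)) with
  | true => simp only [cond_true, reduceIte]; rfl
  | false =>
  simp only [cond_false, Bool.false_eq_true, reduceIte]
  cases (["swimming", "swim"].any fun w => PySem.Str.isIn w (PySem.Str.lower query)) with
  | true => simp only [cond_true, reduceIte]; rfl
  | false =>
  simp only [cond_false, Bool.false_eq_true, reduceIte]
  cases (["hiking", "trekking", "trek"].any fun w => PySem.Str.isIn w (PySem.Str.lower query)) with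
  | true => simp only [cond_true, reduceIte]; rfl
  | false =>
  simp only [cond_false, Bool.false_eq_true, reduceIte]
  cases (["wear", "clothing", "dress", "jacket", "coat"].any fun w => PySem.Str.isIn w (PySem.Str.lower query)) with
  | true => simp only [cond_true, reduceIte]; rfl
  | false =>
  simp only [cond_false, Bool.false_eq_true, reduceIte]
  cases (["activity", "exercise", "sports", "outdoor", "play"].any fun w => PySem.Str.isIn w (PySem.Str.lower query)) with
  | true => simp only [cond_true, reduceIte]; rfl
  | false =>
  simp only [cond_false, Bool.false_eq_true, reduceIte]
  cases (["health", "safe", "safety", "dangerous", "concern"].any fun w => PySem.Str.isIn w (PySem.Str.lower query)) with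
  | true => simp only [cond_true, reduceIte]; rfl
  | false =>
  simp only [cond_false, Bool.false_eq_true, reduceIte]
  cases (["important", "priority", "main", "key", "most"].any fun w => PySem.Str.isIn w (PySem.Str.lower query)) with
  | true => simp only [cond_true, reduceIte]; rfl
  | false =>
  simp only [cond_false, Bool.false_eq_true, reduceIte]
  rfl

-- ===== VERDICT (by name: the statement is the Claim_ definition above) =====
theorem simple_intent_detection_py_spec : Claim_equal_simple_intent_detection_py := by
  intro query _
  unfold Spec_simple_intent_detection_py
  rw [pvA_eq_chain]
  simp only [simple_intent_detection_py_alt]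
  rw [pvNested_eq_fold, pvBest_eq_chain]
  rw [PySem.List.pyGetD_natCast]
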